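-- pv_equiv track=rewrite | github.com/Kobayashi-Kei/docker_specter | source/pytorch_lightning_training_script/archive-20231218/finetune_lstm_share_label copy.py | find_subarray
-- ===== SOURCE A (Python) =====
-- def find_subarray(arr, subarr):
--     n = len(arr)
--     m = len(subarr)
--
--     # サブ配列が配列に含まれるかどうかを調べる
--     for i in range(n - m + 1):
--         j = 0
--         while j < m and arr[i + j] == subarr[j]:
--             j += 1
--         if j == m:
--             return (i, i + m - 1)
--
--     # サブ配列が配列に含まれない場合は None を返す
--     return (None, None)
-- ===== SOURCE B (Python) =====
-- def find_subarray(arr, subarr):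
--     n = len(arr)
--     m = len(subarr)
--     if m > n:
--         return (None, None)
--     if m == 0:
--         return (0, -1)
--     MOD = 2147483647
--     BASE = 1000003
--     p = 1
--     for _ in range(m - 1):
--         p = p * BASE % MOD
--     hp = 0
--     for x in subarr:
--         hp = (hp * BASE + x) % MOD
--     h = 0
--     for x in arr[:m]:
--         h = (h * BASE + x) % MOD
--     i = 0
--     while True:
--         if h == hp and arr[i:i + m] == subarr:
--             return (i, i + m - 1)
--         if i + m == n:
--             return (None, None)
--         h = ((h - arr[i] * p) * BASE + arr[i + m]) % MOD
--         i += 1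
-- ===== Notes on version B (the rewrite author's own statement) =====
-- stated objective: alternative
-- what changed: Replaced the naive position-by-position scan (inner while loop re-comparing elements) by Rabin-Karp: a rolling polynomial hash filters candidate positions, with an exact window comparison only on hash match; on the benchmark's generic inputs the per-element hashing costs more than A's early-exit compare, so no speed is claimed.
import Mathlib
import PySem

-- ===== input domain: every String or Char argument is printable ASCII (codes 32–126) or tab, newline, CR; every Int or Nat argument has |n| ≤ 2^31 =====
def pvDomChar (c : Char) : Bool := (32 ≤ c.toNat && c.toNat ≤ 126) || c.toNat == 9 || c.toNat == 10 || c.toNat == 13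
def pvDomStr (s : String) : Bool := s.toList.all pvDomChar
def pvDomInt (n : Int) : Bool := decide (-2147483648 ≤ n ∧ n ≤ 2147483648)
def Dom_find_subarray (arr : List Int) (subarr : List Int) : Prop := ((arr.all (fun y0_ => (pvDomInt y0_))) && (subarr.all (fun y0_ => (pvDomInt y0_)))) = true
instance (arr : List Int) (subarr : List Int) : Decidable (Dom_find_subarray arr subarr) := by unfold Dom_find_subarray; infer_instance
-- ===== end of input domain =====

-- B replaces A's naive scan by a Rabin-Karp rolling-hash search (exact window comparison on hash
-- match), an alternative algorithm; return value only, neither version mutates its arguments.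

-- ===== PORT A =====
-- inner 'while j < m and arr[i+j] == subarr[j]': fuel = m+1-j bounds the loop; arr[i+j] via pyGet?
-- (for the i produced by the outer range it is always in range, so no IndexError arises in Python).
def findA_while (arr : List Int) (subarr : List Int) (i : Int) : Nat → Nat → Nat
  | 0, j => j
  | fuel + 1, j =>
    if j < subarr.length &&
        (PySem.List.pyGet? arr (i + (j : Int)) == PySem.List.pyGet? subarr (j : Int)) then
      findA_while arr subarr i fuel (j + 1)
    else j

-- 'for i in range(n - m + 1): … if j == m: return (i, i+m-1)'
def findA_outer (arr : List Int) (subarr : List Int) : List Int → List (Option Int)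
  | [] => [none, none]
  | i :: rest =>
    let j := findA_while arr subarr i (subarr.length + 1) 0
    if (j : Int) = (subarr.length : Int) then
      [some i, some (i + (subarr.length : Int) - 1)]
    else findA_outer arr subarr rest

def find_subarray (arr : List Int) (subarr : List Int) : List (Option Int) :=
  findA_outer arr subarr
    (PySem.List.pyRange 0 ((arr.length : Int) - (subarr.length : Int) + 1) 1)

-- ===== PORT B =====
-- the 'while True' loop of Source B; fuel n-m+1-i is an upper bound on the remaining iterations
-- (the loop always returns before exhausting it). arr[i], arr[i+m] are always in range here.
def findB_loop (arr : List Int) (subarr : List Int) (p hp : Int) : Nat → Int → Int → List (Option Int)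
  | 0, _, _ => [none, none]
  | fuel + 1, i, h =>
    if h = hp ∧ PySem.List.slice arr (some i) (some (i + (subarr.length : Int))) = subarr then
      [some i, some (i + (subarr.length : Int) - 1)]
    else if i + (subarr.length : Int) = (arr.length : Int) then [none, none]
    else
      findB_loop arr subarr p hp fuel (i + 1)
        (PySem.Int.mod ((h - (PySem.List.pyGetD arr i 0) * p) * 1000003
            + PySem.List.pyGetD arr (i + (subarr.length : Int)) 0) 2147483647)

def find_subarray_alt (arr : List Int) (subarr : List Int) : List (Option Int) :=
  let n : Int := arr.length
  let m : Int := subarr.length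
  if m > n then [none, none]
  else if m = 0 then [some 0, some (-1)]
  else
    let p := (PySem.List.pyRange 0 (m - 1) 1).foldl
      (fun p _ => PySem.Int.mod (p * 1000003) 2147483647) 1
    let hp := subarr.foldl (fun h x => PySem.Int.mod (h * 1000003 + x) 2147483647) 0
    let h0 := (PySem.List.slice arr none (some m)).foldl
      (fun h x => PySem.Int.mod (h * 1000003 + x) 2147483647) 0
    findB_loop arr subarr p hp (arr.length - subarr.length + 1) 0 h0

-- ===== PRECONDITION & SPEC =====
def Spec_find_subarray (arr : List Int) (subarr : List Int) (out : List (Option Int)) : Prop := out = find_subarray_alt arr subarr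
instance (arr : List Int) (subarr : List Int) (out : List (Option Int)) : Decidable (Spec_find_subarray arr subarr out) := by unfold Spec_find_subarray; infer_instance

-- ===== CLAIM (what is proved, stated in full; the proofs are below) =====
def Claim_equal_find_subarray : Prop := ∀ (arr : List Int) (subarr : List Int), Dom_find_subarray arr subarr → Spec_find_subarray arr subarr (find_subarray arr subarr)

-- ===== LEMMAS AND PROOFS =====

-- reference first-match scan: k remaining candidate positions starting at i
def naiveScan (arr : List Int) (subarr : List Int) : Nat → Nat → List (Option Int)
  | 0, _ => [none, none]
  | k + 1, i =>
    if (arr.drop i).take subarr.length = subarr then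
      [some (i : Int), some ((i : Int) + (subarr.length : Int) - 1)]
    else naiveScan arr subarr k (i + 1)

-- raw (un-reduced) polynomial hash
def hraw (l : List Int) : Int := l.foldl (fun h x => h * 1000003 + x) 0

-- the mod-each-step fold equals the raw fold reduced once
theorem foldl_mod_eq (l : List Int) : ∀ (a b : Int), a = b % 2147483647 →
    l.foldl (fun h x => PySem.Int.mod (h * 1000003 + x) 2147483647) a
      = (l.foldl (fun h x => h * 1000003 + x) b) % 2147483647 := by
  induction l with
  | nil => intro a b h; simpa using h
  | cons x t ih =>
    intro a b h
    simp only [List.foldl_cons]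
    refine ih _ _ ?_
    rw [PySem.Int.mod_eq_emod_of_pos (by norm_num), h]
    have h1 : b % 2147483647 ≡ b [ZMOD 2147483647] :=
      Int.emod_emod_of_dvd b dvd_rfl
    exact Int.ModEq.add_right x (Int.ModEq.mul_right 1000003 h1)

theorem hraw_shift (l : List Int) : ∀ a : Int,
    l.foldl (fun h x => h * 1000003 + x) a
      = a * 1000003 ^ l.length + hraw l := by
  induction l with
  | nil => intro a; simp [hraw]
  | cons x t ih =>
    intro a
    simp only [List.foldl_cons, hraw, List.length_cons]
    rw [ih (a * 1000003 + x), ih (0 * 1000003 + x)]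
    ring

theorem hraw_cons (x : Int) (l : List Int) :
    hraw (x :: l) = x * 1000003 ^ l.length + hraw l := by
  have := hraw_shift l x
  simp only [hraw, List.foldl_cons, zero_mul, zero_add] at *
  exact this

theorem hraw_append_singleton (l : List Int) (y : Int) :
    hraw (l ++ [y]) = hraw l * 1000003 + y := by
  simp [hraw, List.foldl_append]

theorem foldl_pow_mod (l : List Int) : ∀ (a b : Int), a = b % 2147483647 →
    l.foldl (fun p _ => PySem.Int.mod (p * 1000003) 2147483647) a
      = (b * 1000003 ^ l.length) % 2147483647 := by
  induction l with
  | nil => intro a b h; simpa using h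
  | cons x t ih =>
    intro a b h
    simp only [List.foldl_cons, List.length_cons]
    rw [ih _ (b * 1000003) ?_, pow_succ]
    · ring_nf
    · rw [PySem.Int.mod_eq_emod_of_pos (by norm_num), h]
      have h1 : b % 2147483647 ≡ b [ZMOD 2147483647] :=
        Int.emod_emod_of_dvd b dvd_rfl
      exact Int.ModEq.mul_right 1000003 h1

-- window notation: (arr.drop i).take m

theorem window_length (arr : List Int) (i m : Nat) (h : i + m ≤ arr.length) :
    ((arr.drop i).take m).length = m := by
  simp [List.length_take, List.length_drop]; omega

-- pointwise element agreement ↔ window equality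
theorem pointwise_iff_window (arr subarr : List Int) (i : Nat)
    (h : i + subarr.length ≤ arr.length) :
    (∀ k, k < subarr.length →
        PySem.List.pyGet? arr ((i : Int) + (k : Int)) = PySem.List.pyGet? subarr (k : Int))
      ↔ (arr.drop i).take subarr.length = subarr := by
  constructor
  · intro hk
    apply List.ext_getElem (window_length arr i subarr.length h)
    intro k hk1 hk2
    have := hk k hk2
    rw [show ((i : Int) + (k : Int)) = ((i + k : Nat) : Int) by push_cast; ring,
      PySem.List.pyGet?_natCast, PySem.List.pyGet?_natCast] at this
    have hik : i + k < arr.length := by omega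
    rw [List.getElem?_eq_getElem hik, List.getElem?_eq_getElem hk2] at this
    simp only [List.getElem_take, List.getElem_drop]
    exact Option.some.inj this
  · intro hw k hk
    rw [show ((i : Int) + (k : Int)) = ((i + k : Nat) : Int) by push_cast; ring,
      PySem.List.pyGet?_natCast, PySem.List.pyGet?_natCast]
    have hik : i + k < arr.length := by omega
    rw [List.getElem?_eq_getElem hik, List.getElem?_eq_getElem hk]
    have : ((arr.drop i).take subarr.length)[k]'(by
        rw [window_length arr i subarr.length h]; exact hk) = subarr[k]'hk := by
      simp only [hw]
    simpa [List.getElem_take, List.getElem_drop] using this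

-- A's inner while loop returns m iff all remaining positions agree
theorem whileA_eq_m_iff (arr subarr : List Int) (i : Int) :
    ∀ (fuel j : Nat), j ≤ subarr.length → subarr.length - j < fuel →
    (findA_while arr subarr i fuel j = subarr.length ↔
      ∀ k, j ≤ k → k < subarr.length →
        PySem.List.pyGet? arr (i + (k : Int)) = PySem.List.pyGet? subarr (k : Int)) := by
  intro fuel
  induction fuel with
  | zero => intro j _ h; omega
  | succ f ih =>
    intro j hj hf
    rw [findA_while]
    by_cases hjm : j < subarr.length
    · by_cases heq : PySem.List.pyGet? arr (i + (j : Int)) = PySem.List.pyGet? subarr (j : Int)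
      · rw [if_pos (by simp [hjm, heq])]
        rw [ih (j + 1) (by omega) (by omega)]
        constructor
        · intro hall k hk1 hk2
          rcases Nat.eq_or_lt_of_le hk1 with rfl | hlt
          · exact heq
          · exact hall k hlt hk2
        · intro hall k hk1 hk2
          exact hall k (by omega) hk2
      · rw [if_neg (by
          simp only [Bool.and_eq_true, beq_iff_eq, decide_eq_true_eq, not_and]
          exact fun _ => heq)]
        constructor
        · intro h; omega
        · intro hall; exact absurd (hall j le_rfl hjm) heq
    · have hjeq : j = subarr.length := by omega
      rw [if_neg (by simp [hjm])]
      subst hjeq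
      simp only [true_iff]
      intro k hk1 hk2; omega

-- A's outer loop equals the reference scan
theorem outerA_eq_naive (arr subarr : List Int) (hmn : subarr.length ≤ arr.length) :
    ∀ (K i : Nat), i ≤ arr.length - subarr.length → K = arr.length - subarr.length + 1 - i →
    findA_outer arr subarr
        (PySem.List.pyRange (i : Int) ((arr.length : Int) - (subarr.length : Int) + 1) 1)
      = naiveScan arr subarr K i := by
  intro K
  induction K with
  | zero => intro i h1 h2; omega
  | succ K ih =>
    intro i h1 h2
    rw [PySem.List.pyRange_one_cons (by omega)]
    rw [findA_outer, naiveScan]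
    have hwin := whileA_eq_m_iff arr subarr (i : Int) (subarr.length + 1) 0
      (by omega) (by omega)
    have hpt := pointwise_iff_window arr subarr i (by omega)
    by_cases hw : (arr.drop i).take subarr.length = subarr
    · have hj : findA_while arr subarr (i : Int) (subarr.length + 1) 0 = subarr.length := by
        rw [hwin]; intro k _ hk; exact (hpt.mpr hw) k hk
      rw [if_pos hw, hj, if_pos rfl]
    · have hj : findA_while arr subarr (i : Int) (subarr.length + 1) 0 ≠ subarr.length :=
        fun hc => hw (hpt.mp (fun k hk => (hwin.mp hc) k (Nat.zero_le k) hk))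
      rw [if_neg hw, if_neg (by exact_mod_cast hj)]
      by_cases hi : i < arr.length - subarr.length
      · rw [show ((i : Int) + 1) = ((i + 1 : Nat) : Int) by push_cast; ring]
        exact ih (i + 1) (by omega) (by omega)
      · have : i = arr.length - subarr.length := by omega
        have hK : K = 0 := by omega
        subst hK
        rw [show PySem.List.pyRange ((i : Int) + 1) ((arr.length : Int) - (subarr.length : Int) + 1) 1 = [] by
          simp [PySem.List.pyRange]; omega]
        rfl

-- rolling-hash update correctness
theorem roll_step (arr : List Int) (i m : Nat) (hm : 1 ≤ m) (h : i + m < arr.length) :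
    PySem.Int.mod
      (((hraw ((arr.drop i).take m)) % 2147483647
          - arr[i]'(by omega) * ((1000003 ^ (m - 1)) % 2147483647)) * 1000003
        + arr[i + m]'(by omega)) 2147483647
      = (hraw ((arr.drop (i + 1)).take m)) % 2147483647 := by
  set M : Int := 2147483647 with hM
  set a : Int := arr[i]'(by omega)
  set y : Int := arr[i + m]'(by omega)
  set mid : List Int := (arr.drop (i + 1)).take (m - 1) with hmid
  have hmidlen : mid.length = m - 1 := by
    simp [hmid, List.length_take, List.length_drop]; omega
  have hw1 : (arr.drop i).take m = a :: mid := by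
    rw [List.drop_eq_getElem_cons (show i < arr.length by omega), List.take_cons (by omega)]
  have hw2 : (arr.drop (i + 1)).take m = mid ++ [y] := by
    rw [show m = (m - 1) + 1 by omega, List.take_add_one, hmid]
    congr 1
    have hlen : m - 1 < (arr.drop (i + 1)).length := by
      simp [List.length_drop]; omega
    rw [List.getElem?_eq_getElem hlen]
    simp [List.getElem_drop]
    congr 1; omega
  have hr1 : hraw ((arr.drop i).take m) = a * 1000003 ^ (m - 1) + hraw mid := by
    rw [hw1, hraw_cons, hmidlen]
  have hr2 : hraw ((arr.drop (i + 1)).take m) = hraw mid * 1000003 + y := by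
    rw [hw2, hraw_append_singleton]
  rw [PySem.Int.mod_eq_emod_of_pos (by norm_num)]
  have h1 : hraw ((arr.drop i).take m) % M ≡ hraw ((arr.drop i).take m) [ZMOD M] :=
    Int.emod_emod_of_dvd _ dvd_rfl
  have h2 : (1000003 ^ (m - 1) : Int) % M ≡ 1000003 ^ (m - 1) [ZMOD M] :=
    Int.emod_emod_of_dvd _ dvd_rfl
  have hmodeq :
      (hraw ((arr.drop i).take m) % M - a * ((1000003 ^ (m - 1)) % M)) * 1000003 + y
        ≡ (hraw ((arr.drop i).take m) - a * (1000003 ^ (m - 1))) * 1000003 + y [ZMOD M] :=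
    ((h1.sub (h2.mul_left a)).mul_right 1000003).add_right y
  have heq2 : (hraw ((arr.drop i).take m) - a * (1000003 ^ (m - 1))) * 1000003 + y
      = hraw ((arr.drop (i + 1)).take m) := by
    rw [hr1, hr2]; ring
  rw [← heq2]
  exact hmodeq

-- B's loop equals the reference scan (hash invariant carried along)
theorem loopB_eq_naive (arr subarr : List Int) (hm1 : 1 ≤ subarr.length)
    (hmn : subarr.length ≤ arr.length) :
    ∀ (K i : Nat), i ≤ arr.length - subarr.length →
      K = arr.length - subarr.length + 1 - i →
    findB_loop arr subarr ((1000003 ^ (subarr.length - 1)) % 2147483647)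
        ((hraw subarr) % 2147483647) K (i : Int)
        ((hraw ((arr.drop i).take subarr.length)) % 2147483647)
      = naiveScan arr subarr K i := by
  intro K
  induction K with
  | zero => intro i h1 h2; omega
  | succ K ih =>
    intro i h1 h2
    rw [findB_loop, naiveScan]
    have hslice : PySem.List.slice arr (some (i : Int)) (some ((i : Int) + (subarr.length : Int)))
        = (arr.drop i).take subarr.length := PySem.List.slice_natCast_add arr i subarr.length
    by_cases hw : (arr.drop i).take subarr.length = subarr
    · rw [if_pos ⟨by rw [hw], by rw [hslice, hw]⟩, if_pos hw]
    · have hcond : ¬ ((hraw ((arr.drop i).take subarr.length)) % 2147483647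
          = hraw subarr % 2147483647 ∧
          PySem.List.slice arr (some (i : Int)) (some ((i : Int) + (subarr.length : Int)))
            = subarr) := by
        rintro ⟨-, hs⟩; rw [hslice] at hs; exact hw hs
      rw [if_neg hcond, if_neg hw]
      by_cases hend : i = arr.length - subarr.length
      · have hK : K = 0 := by omega
        subst hK
        rw [if_pos (by omega)]
        rfl
      · have hik : i + subarr.length < arr.length := by omega
        rw [if_neg (by omega)]
        rw [PySem.List.pyGetD_eq_getElem arr 0 (by positivity) (by omega),
          show (i : Int) + (subarr.length : Int) = ((i + subarr.length : Nat) : Int) by push_cast; ring,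
          PySem.List.pyGetD_eq_getElem arr 0 (by positivity) (by omega)]
        simp only [Int.toNat_natCast]
        rw [roll_step arr i subarr.length hm1 hik,
          show (i : Int) + 1 = ((i + 1 : Nat) : Int) by push_cast; ring]
        exact ih (i + 1) (by omega) (by omega)

-- ===== VERDICT (by name: the statement is the Claim_ definition above) =====
theorem find_subarray_spec : Claim_equal_find_subarray := by
  intro arr subarr _
  unfold Spec_find_subarray
  simp only [find_subarray, find_subarray_alt]
  by_cases hgt : (subarr.length : Int) > (arr.length : Int)
  · rw [if_pos hgt,
      show PySem.List.pyRange 0 ((arr.length : Int) - (subarr.length : Int) + 1) 1 = [] by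
        simp [PySem.List.pyRange]; omega]
    rfl
  · rw [if_neg hgt]
    have hmn : subarr.length ≤ arr.length := by exact_mod_cast not_lt.mp hgt
    have hA := outerA_eq_naive arr subarr hmn (arr.length - subarr.length + 1) 0
      (by omega) (by omega)
    simp only [Nat.cast_zero] at hA
    by_cases hm0 : (subarr.length : Int) = 0
    · rw [if_pos hm0]
      have h0 : subarr.length = 0 := by exact_mod_cast hm0
      have hnil : subarr = [] := List.eq_nil_of_length_eq_zero h0
      rw [hA, show arr.length - subarr.length + 1 = (arr.length - subarr.length) + 1 from rfl,
        naiveScan]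
      rw [if_pos (by simp [hnil])]
      simp [h0]
    · rw [if_neg hm0]
      have hm1 : 1 ≤ subarr.length := by
        rcases Nat.eq_zero_or_pos subarr.length with h | h
        · exact absurd (by exact_mod_cast h) hm0
        · exact h
      have hp' : (PySem.List.pyRange 0 ((subarr.length : Int) - 1) 1).foldl
          (fun p _ => PySem.Int.mod (p * 1000003) 2147483647) 1
          = (1000003 ^ (subarr.length - 1)) % 2147483647 := by
        rw [show (subarr.length : Int) - 1 = ((subarr.length - 1 : Nat) : Int) by push_cast [hm1]; ring,
          PySem.List.pyRange_zero_natCast]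
        rw [foldl_pow_mod _ 1 1 (by norm_num)]
        simp
      have hhp : subarr.foldl (fun h x => PySem.Int.mod (h * 1000003 + x) 2147483647) 0
          = hraw subarr % 2147483647 := foldl_mod_eq subarr 0 0 (by norm_num)
      have hh0 : (PySem.List.slice arr none (some (subarr.length : Int))).foldl
          (fun h x => PySem.Int.mod (h * 1000003 + x) 2147483647) 0
          = hraw ((arr.drop 0).take subarr.length) % 2147483647 := by
        rw [PySem.List.slice_to_natCast, List.drop_zero]
        exact foldl_mod_eq _ 0 0 (by norm_num)
      rw [hp', hhp, hh0, hA]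
      have hB := loopB_eq_naive arr subarr hm1 hmn (arr.length - subarr.length + 1) 0
        (by omega) (by omega)
      simp only [Nat.cast_zero] at hB
      rw [hB]
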